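/- GENERATED by farm/mkstatement.py from design/units.tsv (unit `DGifGetRecordType.1`) and the assertions of Gif/Spec/Seg_DGifGetRecordType.lean — do not edit.
   THE STATEMENT of the proof unit `DGifGetRecordType.1`: segment 1 of `DGifGetRecordType` (23 instructions; entries 0x108bc9;
   exits 0x108bf5,0x108c3e; ranges 0x108bc9-0x108bf5,0x108c0e-0x108c3e)
   takes each of its entry assertions to one of its exit assertions (`Gif.Spec.DGifGetRecordType.Seg1`), given the contracts of its callees.
   What the names mean: ProgX/Base/Spec/Basic.lean (the shared hypotheses), Gif/Spec/Seg_DGifGetRecordType.lean (the assertions). The theorem to prove: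
   `theorem DGifGetRecordType_1_ok : Gif.Spec.DGifGetRecordType_1.Statement`. -/
import Gif.Code
import Gif.Dec.All
import Gif.Labels
import Gif.Spec.Reader
import Gif.Spec.Seg_DGifGetRecordType
namespace Gif.Spec.DGifGetRecordType_1
open X86 X86.User Asan

/-- The statement of unit `DGifGetRecordType.1`. -/
def Statement : Prop :=
  ∀ (Lay : Layout) (_hLay : Lay.hi = 0x1000000) (μ : Microarch) (_hμ : UserX.MicroOK μ) (u₀ : State)
    (_hcode : HasCodeNat Lay u₀ Gif.L.DGifGetRecordType.entry Gif.Code.code_DGifGetRecordType.nat Gif.L.DGifGetRecordType.size)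
    (_h_InternalRead : ∀ (H : Heap) (rest : List Obj) (frames : List (Nat × FrameLayout)) (F : Forest) (R : Rd) (n : Nat), Calls Lay μ ProgX.Base.WayInv (ProgX.Base.conv u₀) Gif.L.InternalRead.entry (Gif.Spec.InternalRead.spec H rest frames F R n))
    (_h_asan_load8_noabort : Asan.SmallCheck Lay μ ProgX.Base.WayInv (ProgX.Base.CodeOK u₀) [.rax, .rcx, .rdx] 8 ProgX.Base.L.__asan_load8_noabort.entry)
    (_h_asan_load4_noabort : Asan.SmallCheck Lay μ ProgX.Base.WayInv (ProgX.Base.CodeOK u₀) [.rax, .rcx, .rdx] 4 ProgX.Base.L.__asan_load4_noabort.entry)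
    (_h_asan_store4_noabort : Asan.SmallCheck Lay μ ProgX.Base.WayInv (ProgX.Base.CodeOK u₀) [.rax, .rcx, .rdx] 4 ProgX.Base.L.__asan_store4_noabort.entry),
    Gif.Spec.DGifGetRecordType.Seg1 Lay μ u₀

end Gif.Spec.DGifGetRecordType_1
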